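-- pv_equiv track=rewrite | github.com/jmhern/Gauss_Lemma_Quadratic_Resid | gauss_lemma.py | get_s
-- ===== SOURCE A (Python) =====
-- from math import floor
--
-- def get_s(a,p):
-- 	stop = floor((p-1)/2)
-- 	s = 0
-- 	coeffs = range(1, stop+1)
-- 	for i in coeffs:
-- 		#note that through gauss lemma
-- 		#there will be no repititions
-- 		if (i*a) % p  > p/2:
-- 			s+=1
-- 	return s
-- ===== SOURCE B (Python) =====
-- from math import gcd
--
-- def floor_sum(n, m, a, b):
--     # sum((a*i + b) // m for i in range(n)); requires n >= 0, m > 0. O(log m).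
--     ans = 0
--     if a < 0:
--         a2 = a % m
--         ans -= n * (n - 1) // 2 * ((a2 - a) // m)
--         a = a2
--     if b < 0:
--         b2 = b % m
--         ans -= n * ((b2 - b) // m)
--         b = b2
--     while True:
--         if a >= m:
--             ans += n * (n - 1) // 2 * (a // m)
--             a %= m
--         if b >= m:
--             ans += n * (b // m)
--             b %= m
--         y_max = a * n + b
--         if y_max < m:
--             break
--         n = y_max // m
--         b = y_max % m
--         m, a = a, m
--     return ans
--
--
-- def get_s(a, p):
--     # Gauss-lemma count: #{i in [1,(p-1)/2] : (i*a) % p > p/2},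
--     # evaluated in O(log p) as sum(2*a*i//p) - 2*sum(a*i//p) over i = 1..(p-1)/2,
--     # minus the count of boundary residues exactly equal to p/2.
--     n = (p - 1) // 2
--     if n <= 0:
--         return 0
--     s = floor_sum(n, p, 2 * a, 2 * a) - 2 * floor_sum(n, p, a, a)
--     # boundary residues (i*a) % p == p/2 (possible only for even p) are counted 1 by the
--     # floor difference but 0 by the strict comparison: subtract their count,
--     # #{i <= n : p | 2*a*i} - #{i <= n : p | a*i} = n // (p // gcd(2*a, p)) - n // (p // gcd(a, p))
--     return s - (n // (p // gcd(2 * a, p)) - n // (p // gcd(a, p)))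
-- ===== Notes on version B (the rewrite author's own statement) =====
-- stated objective: faster
-- what changed: A scans all i in [1,(p-1)/2] testing (i*a)%p > p/2; B computes the same count as floor_sum(n,p,2a,2a)-2*floor_sum(n,p,a,a) via the Euclidean (AtCoder-style) floor-sum algorithm, minus a gcd-based count of the boundary residues equal to p/2, O(log p) instead of O(p).
import Mathlib
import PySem

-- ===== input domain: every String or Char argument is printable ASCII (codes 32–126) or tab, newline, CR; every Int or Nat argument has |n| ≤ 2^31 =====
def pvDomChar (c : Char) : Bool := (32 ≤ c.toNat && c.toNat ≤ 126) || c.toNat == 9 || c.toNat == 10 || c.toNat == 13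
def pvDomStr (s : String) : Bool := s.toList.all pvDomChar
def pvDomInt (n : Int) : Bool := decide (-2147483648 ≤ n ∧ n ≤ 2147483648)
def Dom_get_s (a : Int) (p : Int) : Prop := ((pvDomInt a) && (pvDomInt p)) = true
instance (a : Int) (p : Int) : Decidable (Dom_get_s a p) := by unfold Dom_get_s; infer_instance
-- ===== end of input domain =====

-- B replaces A's O(p) scan of i in [1,(p-1)/2] by two Euclidean floor-sums plus a gcd-based boundary count, O(log p).


-- ===== PORT A =====
-- floor((p-1)/2) on a binary float is exact for |p| ≤ 2^31, so it is (p-1)//2;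
-- '(i*a) % p > p/2' compares an int with the exact half-integer float p/2, so it is 2*((i*a)%p) > p.
def get_s (a : Int) (p : Int) : Int :=
  let stop := PySem.Int.floordiv (p - 1) 2
  let coeffs := PySem.List.pyRange 1 (stop + 1) 1
  coeffs.foldl (fun s i => if 2 * PySem.Int.mod (i * a) p > p then s + 1 else s) 0

-- ===== PORT B =====
-- Port of Source B's floor_sum while-loop; state (n, m, a, b, ans), recursion = next loop iteration.
def floorSumLoop (n m a b ans : Int) : Int :=
  if hm : m ≤ 0 then ans   -- totality guard only: floor_sum always runs the loop with m > 0
  else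
    let a1 := if a ≥ m then PySem.Int.mod a m else a
    let ans1 := if a ≥ m then ans + PySem.Int.floordiv (n * (n - 1)) 2 * PySem.Int.floordiv a m else ans
    let b1 := if b ≥ m then PySem.Int.mod b m else b
    let ans2 := if b ≥ m then ans1 + n * PySem.Int.floordiv b m else ans1
    let ymax := a1 * n + b1
    if ymax < m then ans2
    else floorSumLoop (PySem.Int.floordiv ymax m) a1 m (PySem.Int.mod ymax m) ans2
termination_by m.toNat
decreasing_by
  have h2 := PySem.Int.mod_lt a (show (0:Int) < m by omega)
  split <;> omega

-- Port of Source B's floor_sum: normalize negative a and b, then run the loop.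
def floorSum (n m a b : Int) : Int :=
  let a1 := if a < 0 then PySem.Int.mod a m else a
  let ans1 := if a < 0 then
      (0 : Int) - PySem.Int.floordiv (n * (n - 1)) 2 * PySem.Int.floordiv (a1 - a) m else 0
  let b1 := if b < 0 then PySem.Int.mod b m else b
  let ans2 := if b < 0 then ans1 - n * PySem.Int.floordiv (b1 - b) m else ans1
  floorSumLoop n m a1 b1 ans2

-- math.gcd(x, y) is Int.gcd x y (the nonnegative gcd), exact.
def get_s_alt (a : Int) (p : Int) : Int :=
  let n := PySem.Int.floordiv (p - 1) 2
  if n ≤ 0 then 0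
  else
    let s := floorSum n p (2 * a) (2 * a) - 2 * floorSum n p a a
    s - (PySem.Int.floordiv n (PySem.Int.floordiv p (Int.gcd (2 * a) p))
         - PySem.Int.floordiv n (PySem.Int.floordiv p (Int.gcd a p)))

-- ===== PRECONDITION & SPEC =====
def Spec_get_s (a : Int) (p : Int) (out : Int) : Prop := out = get_s_alt a p
instance (a : Int) (p : Int) (out : Int) : Decidable (Spec_get_s a p out) := by unfold Spec_get_s; infer_instance

-- ===== CLAIM (what is proved, stated in full; the proofs are below) =====
def Claim_equal_get_s : Prop := ∀ (a : Int) (p : Int), Dom_get_s a p → Spec_get_s a p (get_s a p)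

-- ===== LEMMAS AND PROOFS =====

lemma countBelow (K : ℕ) (v : ℤ) (h0 : 0 ≤ v) (hK : v ≤ K) :
    ∑ j ∈ Finset.range K, (if (j:ℤ) < v then (1:ℤ) else 0) = v := by
  induction K with
  | zero => simp at hK ⊢; omega
  | succ K ih =>
    rw [Finset.sum_range_succ]
    by_cases h : v ≤ K
    · rw [ih h, if_neg (by push_cast; omega)]; ring
    · have hv : v = K + 1 := by push_cast at hK; push_cast; omega
      have hall : ∑ j ∈ Finset.range K, (if (j:ℤ) < v then (1:ℤ) else 0)
          = ∑ j ∈ Finset.range K, (1:ℤ) := by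
        refine Finset.sum_congr rfl fun j hj => ?_
        rw [if_pos]
        have := Finset.mem_range.mp hj
        push_cast; omega
      rw [hall, if_pos (by push_cast; omega)]
      simp; omega
  
lemma countFrom (N : ℕ) (c : ℤ) (h0 : 0 ≤ c) (hN : c ≤ N) :
    ∑ i ∈ Finset.range N, (if c ≤ (i:ℤ) then (1:ℤ) else 0) = N - c := by
  induction N with
  | zero => simp at hN ⊢; omega
  | succ N ih =>
    rw [Finset.sum_range_succ]
    by_cases h : c ≤ N
    · rw [ih h, if_pos (by push_cast; omega)]; push_cast; ring
    · push_cast at h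
      rw [if_neg (by push_cast; omega)]
      have hall : ∑ i ∈ Finset.range N, (if c ≤ (i:ℤ) then (1:ℤ) else 0)
          = ∑ i ∈ Finset.range N, (0:ℤ) := by
        refine Finset.sum_congr rfl fun i hi => ?_
        rw [if_neg]
        have := Finset.mem_range.mp hi
        push_cast; omega
      rw [hall]
      push_cast at hN ⊢
      simp; omega

lemma sumId (n : ℤ) (hn : 0 ≤ n) : ∑ i ∈ Finset.range n.toNat, (i:ℤ) = n * (n - 1) / 2 := by
  have hN : ((n.toNat : ℤ)) = n := Int.toNat_of_nonneg hn
  have h2 := Finset.sum_range_id_mul_two n.toNat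
  rcases Nat.eq_zero_or_pos n.toNat with h | h
  · have hn0 : n = 0 := by omega
    rw [h, hn0]; simp
  · have : (∑ i ∈ Finset.range n.toNat, (i:ℤ)) * 2 = n * (n - 1) := by
      have := congrArg (Nat.cast : ℕ → ℤ) h2
      push_cast [Nat.cast_sub h] at this
      rw [hN] at this
      exact this
    omega

def fsSpec (n m a b : Int) : Int := ∑ i ∈ Finset.range n.toNat, (a * (i : Int) + b) / m

lemma fsSpec_reduce_a (n m a b : ℤ) (hm : 0 < m) (hn : 0 ≤ n) :
    fsSpec n m a b = n * (n - 1) / 2 * (a / m) + fsSpec n m (a % m) b := by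
  unfold fsSpec
  have hterm : ∀ i : ℕ, (a * (i:ℤ) + b) / m = (a % m * (i:ℤ) + b) / m + a / m * (i:ℤ) := by
    intro i
    have h1 : a * (i:ℤ) + b = (a % m * (i:ℤ) + b) + (a / m * (i:ℤ)) * m := by
      have := Int.ediv_add_emod a m
      ring_nf
      nlinarith [Int.ediv_add_emod a m]
    rw [h1, Int.add_mul_ediv_right _ _ (by omega : m ≠ 0)]
  calc ∑ i ∈ Finset.range n.toNat, (a * (i:ℤ) + b) / m
      = ∑ i ∈ Finset.range n.toNat, ((a % m * (i:ℤ) + b) / m + a / m * (i:ℤ)) := by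
        exact Finset.sum_congr rfl fun i _ => hterm i
    _ = (∑ i ∈ Finset.range n.toNat, (a % m * (i:ℤ) + b) / m)
        + a / m * ∑ i ∈ Finset.range n.toNat, (i:ℤ) := by
        rw [Finset.sum_add_distrib, Finset.mul_sum]
    _ = n * (n - 1) / 2 * (a / m) + ∑ i ∈ Finset.range n.toNat, (a % m * (i:ℤ) + b) / m := by
        rw [sumId n hn]; ring

lemma fsSpec_reduce_b (n m a b : ℤ) (hm : 0 < m) (hn : 0 ≤ n) :
    fsSpec n m a b = n * (b / m) + fsSpec n m a (b % m) := by
  unfold fsSpec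
  have hterm : ∀ i : ℕ, (a * (i:ℤ) + b) / m = (a * (i:ℤ) + b % m) / m + b / m := by
    intro i
    have h1 : a * (i:ℤ) + b = (a * (i:ℤ) + b % m) + (b / m) * m := by
      nlinarith [Int.ediv_add_emod b m]
    rw [h1, Int.add_mul_ediv_right _ _ (by omega : m ≠ 0)]
  rw [Finset.sum_congr rfl fun i _ => hterm i, Finset.sum_add_distrib]
  simp [Int.toNat_of_nonneg hn]
  ring

lemma fsSpec_zero (n m a b : ℤ) (hm : 0 < m) (ha : 0 ≤ a) (hb : 0 ≤ b) (hy : a * n + b < m) :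
    fsSpec n m a b = 0 := by
  unfold fsSpec
  refine Finset.sum_eq_zero fun i hi => ?_
  have hi' := Finset.mem_range.mp hi
  have hin : (i:ℤ) < n := by
    have : (i:ℤ) < (n.toNat : ℤ) := by exact_mod_cast hi'
    omega
  have h0 : 0 ≤ a * (i:ℤ) + b := by positivity
  have hlt : a * (i:ℤ) + b < m := by nlinarith
  exact Int.ediv_eq_zero_of_lt h0 hlt

lemma fsSpec_swap (n m a b : ℤ) (hm : 0 < m) (ha : 0 < a) (hb0 : 0 ≤ b) (hbm : b < m)
    (hn : 0 ≤ n) :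
    fsSpec n m a b = fsSpec ((a * n + b) / m) a m ((a * n + b) % m) := by
  set D := a * n + b with hD
  set Y := D / m with hY
  set r := D % m with hr
  have hD0 : 0 ≤ D := by nlinarith
  have hY0 : 0 ≤ Y := Int.ediv_nonneg hD0 (le_of_lt hm)
  have hr0 : 0 ≤ r := Int.emod_nonneg D (by omega)
  have hrm : r < m := Int.emod_lt_of_pos D hm
  have hDmY : D = m * Y + r := by rw [hY, hr]; linarith [Int.ediv_add_emod D m]
  have hYN : ((Y.toNat : ℤ)) = Y := Int.toNat_of_nonneg hY0
  have hNn : ((n.toNat : ℤ)) = n := Int.toNat_of_nonneg hn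
  -- Step A: each term is a count of j < Y with (j+1)*m ≤ a*i+b
  have stepA : fsSpec n m a b
      = ∑ i ∈ Finset.range n.toNat, ∑ j ∈ Finset.range Y.toNat,
          (if ((j:ℤ) + 1) * m ≤ a * (i:ℤ) + b then (1:ℤ) else 0) := by
    unfold fsSpec
    refine Finset.sum_congr rfl fun i hi => ?_
    have hi' : (i:ℤ) < n := by
      have := Finset.mem_range.mp hi; omega
    have hx0 : 0 ≤ a * (i:ℤ) + b := by positivity
    have hxD : a * (i:ℤ) + b ≤ D := by nlinarith
    have hv0 : 0 ≤ (a * (i:ℤ) + b) / m := Int.ediv_nonneg hx0 (le_of_lt hm)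
    have hvY : (a * (i:ℤ) + b) / m ≤ Y := Int.ediv_le_ediv hm hxD
    rw [← countBelow Y.toNat ((a * (i:ℤ) + b) / m) hv0 (by omega)]
    refine Finset.sum_congr rfl fun j _ => ?_
    congr 1
    have : ((j:ℤ) < (a * (i:ℤ) + b) / m) ↔ ((j:ℤ) + 1 ≤ (a * (i:ℤ) + b) / m) := by omega
    rw [this, Int.le_ediv_iff_mul_le hm]
  -- Step C: after swapping, each inner sum is (m*(Y-1-j)+r)/a
  have stepC : ∀ j : ℕ, j < Y.toNat →
      (∑ i ∈ Finset.range n.toNat, (if ((j:ℤ) + 1) * m ≤ a * (i:ℤ) + b then (1:ℤ) else 0))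
        = (m * (Y - 1 - (j:ℤ)) + r) / a := by
    intro j hj
    set t : ℤ := ((j:ℤ) + 1) * m - b with ht
    have ht0 : 0 < t := by
      have : (0:ℤ) ≤ (j:ℤ) := by positivity
      nlinarith
    set c : ℤ := -((-t) / a) with hc
    have hcond : ∀ i : ℕ, (((j:ℤ) + 1) * m ≤ a * (i:ℤ) + b) ↔ (c ≤ (i:ℤ)) := by
      intro i
      have h1 : (-(i:ℤ) ≤ (-t) / a) ↔ (-(i:ℤ) * a ≤ -t) := Int.le_ediv_iff_mul_le ha
      constructor
      · intro h; have : -(i:ℤ) * a ≤ -t := by nlinarith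
        have := h1.mpr this; omega
      · intro h
        have : -(i:ℤ) ≤ (-t) / a := by omega
        have := h1.mp this; nlinarith
    have hc1 : 1 ≤ c := by
      have : (-t) / a < 0 := Int.ediv_neg_of_neg_of_pos (by omega) ha
      omega
    have hjY : (j:ℤ) + 1 ≤ Y := by omega
    have htna : t ≤ n * a := by
      have h2 : ((j:ℤ) + 1) * m ≤ Y * m := by nlinarith
      nlinarith
    have hcn : c ≤ n := by
      have h3 : -n * a ≤ -t := by nlinarith
      have := (Int.le_ediv_iff_mul_le ha).mpr h3
      omega
    have := countFrom n.toNat c (by omega) (by omega)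
    rw [Finset.sum_congr rfl (fun i _ => by rw [if_congr (hcond i) rfl rfl]), this, hNn]
    -- n - c = (m*(Y-1-j)+r)/a
    have hsplit : m * (Y - 1 - (j:ℤ)) + r = -t + n * a := by
      have : D = m * Y + r := hDmY
      nlinarith
    rw [hsplit, Int.add_mul_ediv_right _ _ (by omega : a ≠ 0)]
    omega
  -- assemble
  rw [stepA, Finset.sum_comm]
  rw [Finset.sum_congr rfl fun j hj => stepC j (Finset.mem_range.mp hj)]
  have := Finset.sum_range_reflect (fun k : ℕ => (m * (k:ℤ) + r) / a) Y.toNat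
  unfold fsSpec
  rw [← this]
  refine Finset.sum_congr rfl fun j hj => ?_
  have hj' := Finset.mem_range.mp hj
  have hcast : ((Y.toNat - 1 - j : ℕ) : ℤ) = Y - 1 - (j:ℤ) := by omega
  rw [hcast]

lemma floorSumLoop_eq (M : ℕ) : ∀ (m n a b ans : ℤ), m.toNat ≤ M → 0 < m → 0 ≤ n → 0 ≤ a → 0 ≤ b →
    floorSumLoop n m a b ans = ans + fsSpec n m a b := by
  induction M with
  | zero => intro m n a b ans hM hm hn ha hb; omega
  | succ M ih =>
    intro m n a b ans hM hm hn ha hb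
    rw [floorSumLoop, dif_neg (show ¬ m ≤ 0 by omega)]
    simp only [PySem.Int.floordiv_eq_ediv_of_pos hm, PySem.Int.mod_eq_emod_of_pos hm,
      PySem.Int.floordiv_eq_ediv_of_pos (show (0:ℤ) < 2 by norm_num)]
    set a1 : ℤ := if a ≥ m then a % m else a with ha1def
    set b1 : ℤ := if b ≥ m then b % m else b with hb1def
    set ans1 : ℤ := if a ≥ m then ans + n * (n - 1) / 2 * (a / m) else ans with hans1def
    set ans2 : ℤ := if b ≥ m then ans1 + n * (b / m) else ans1 with hans2def
    have ha1 : 0 ≤ a1 ∧ a1 < m := by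
      rw [ha1def]; split
      · exact ⟨Int.emod_nonneg a (by omega), Int.emod_lt_of_pos a hm⟩
      · omega
    have hb1 : 0 ≤ b1 ∧ b1 < m := by
      rw [hb1def]; split
      · exact ⟨Int.emod_nonneg b (by omega), Int.emod_lt_of_pos b hm⟩
      · omega
    have hinv : ans2 + fsSpec n m a1 b1 = ans + fsSpec n m a b := by
      have hstep1 : ans1 + fsSpec n m a1 b = ans + fsSpec n m a b := by
        rw [hans1def, ha1def]; split
        · rw [fsSpec_reduce_a n m a b hm hn]; ring
        · rfl
      have hstep2 : ans2 + fsSpec n m a1 b1 = ans1 + fsSpec n m a1 b := by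
        rw [hans2def, hb1def]; split
        · rw [fsSpec_reduce_b n m a1 b hm hn]; ring
        · rfl
      rw [hstep2, hstep1]
    split
    · -- loop exits: remaining sum is zero
      rename_i hlt
      rw [← hinv, fsSpec_zero n m a1 b1 hm ha1.1 hb1.1 hlt]
      omega
    · rename_i hge
      have ha1pos : 0 < a1 := by
        rcases eq_or_lt_of_le ha1.1 with h | h
        · exfalso; rw [← h] at hge; simp at hge; omega
        · exact h
      have hy0 : 0 ≤ a1 * n + b1 := by nlinarith [ha1.1, hb1.1]
      rw [ih a1 ((a1 * n + b1) / m) m ((a1 * n + b1) % m) ans2 (by omega) ha1pos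
        (Int.ediv_nonneg hy0 (le_of_lt hm)) (le_of_lt hm) (Int.emod_nonneg _ (by omega))]
      rw [← fsSpec_swap n m a1 b1 hm ha1pos hb1.1 hb1.2 hn, hinv]

lemma floorSum_eq (n m a b : ℤ) (hm : 0 < m) (hn : 0 ≤ n) :
    floorSum n m a b = fsSpec n m a b := by
  unfold floorSum
  simp only [PySem.Int.floordiv_eq_ediv_of_pos hm, PySem.Int.mod_eq_emod_of_pos hm,
    PySem.Int.floordiv_eq_ediv_of_pos (show (0:ℤ) < 2 by norm_num)]
  set a1 : ℤ := if a < 0 then a % m else a with ha1def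
  set b1 : ℤ := if b < 0 then b % m else b with hb1def
  set ans1 : ℤ := if a < 0 then 0 - n * (n - 1) / 2 * ((a1 - a) / m) else 0 with hans1def
  set ans2 : ℤ := if b < 0 then ans1 - n * ((b1 - b) / m) else ans1 with hans2def
  have hqa : ∀ x : ℤ, (x % m - x) / m = -(x / m) := by
    intro x
    rw [show x % m - x = -(x / m) * m by linarith [Int.emod_def x m],
      Int.mul_ediv_cancel _ (by omega : m ≠ 0)]
  have ha1 : 0 ≤ a1 := by
    rw [ha1def]; split
    · exact Int.emod_nonneg a (by omega)
    · omega
  have hb1 : 0 ≤ b1 := by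
    rw [hb1def]; split
    · exact Int.emod_nonneg b (by omega)
    · omega
  rw [floorSumLoop_eq m.toNat m n a1 b1 ans2 le_rfl hm hn ha1 hb1]
  have hstep1 : ans1 + fsSpec n m a1 b = fsSpec n m a b := by
    rw [hans1def, ha1def]; split
    · rw [fsSpec_reduce_a n m a b hm hn, hqa a]; ring
    · simp
  have hstep2 : ans2 + fsSpec n m a1 b1 = ans1 + fsSpec n m a1 b := by
    rw [hans2def, hb1def]; split
    · rw [fsSpec_reduce_b n m a1 b hm hn, hqa b]; ring
    · rfl
  rw [hstep2, hstep1]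

lemma get_s_fold (a p : ℤ) (k : ℕ) :
    (PySem.List.pyRange 1 ((k:ℤ) + 1) 1).foldl
        (fun s i => if 2 * PySem.Int.mod (i * a) p > p then s + 1 else s) 0
      = ∑ i ∈ Finset.range k, (if 2 * PySem.Int.mod (((i:ℤ) + 1) * a) p > p then (1:ℤ) else 0) := by
  induction k with
  | zero => rw [show ((0:ℕ):ℤ) + 1 = 1 by norm_num, PySem.List.pyRange_one_eq_nil (by norm_num)]; simp
  | succ k ih =>
    rw [show ((k+1:ℕ):ℤ) + 1 = ((k:ℤ) + 1) + 1 by push_cast; ring,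
      PySem.List.pyRange_one_succ_right (by push_cast; omega), List.foldl_append, ih,
      Finset.sum_range_succ]
    simp only [List.foldl_cons, List.foldl_nil]
    push_cast
    split <;> ring

-- (x+1)/d steps by 1 exactly at multiples of d
lemma succ_ediv (d x : ℤ) (hd : 0 < d) :
    (x + 1) / d = x / d + (if d ∣ (x + 1) then (1:ℤ) else 0) := by
  have hr0 : 0 ≤ x % d := Int.emod_nonneg _ (by omega)
  have hrd : x % d < d := Int.emod_lt_of_pos _ hd
  have hx : x = d * (x / d) + x % d := by linarith [Int.ediv_add_emod x d]
  by_cases h : x % d + 1 = d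
  · have hdvd : d ∣ x + 1 := ⟨x / d + 1, by linear_combination hx + h⟩
    rw [if_pos hdvd, show x + 1 = 0 + (x / d + 1) * d by linear_combination hx + h,
      Int.add_mul_ediv_right _ _ (by omega : d ≠ 0), Int.zero_ediv]
    ring
  · have hnd : ¬ d ∣ x + 1 := by
      rintro ⟨t, ht⟩
      have h2 : d ∣ x % d + 1 := ⟨t - x / d, by linear_combination ht - hx⟩
      have := Int.le_of_dvd (by omega) h2
      omega
    rw [if_neg hnd, show x + 1 = (x % d + 1) + (x / d) * d by linear_combination hx,
      Int.add_mul_ediv_right _ _ (by omega : d ≠ 0),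
      Int.ediv_eq_zero_of_lt (by omega) (by omega)]
    ring

-- count of multiples of d among 1..n
lemma countDvd (d : ℤ) (hd : 0 < d) (k : ℕ) :
    ∑ i ∈ Finset.range k, (if d ∣ ((i:ℤ) + 1) then (1:ℤ) else 0) = (k : ℤ) / d := by
  induction k with
  | zero => simp
  | succ k ih =>
    rw [Finset.sum_range_succ, ih, show ((k+1:ℕ):ℤ) = (k:ℤ) + 1 by push_cast; ring,
      succ_ediv d (k:ℤ) hd]

-- p ∣ c*i  ↔  (p / gcd c p) ∣ i
lemma dvdIff (c p i : ℤ) (hp : 0 < p) :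
    p ∣ c * i ↔ ((p / (Int.gcd c p : ℤ)) ∣ i) := by
  have hgne : Int.gcd c p ≠ 0 := by
    simp [Int.gcd_eq_zero_iff]
    omega
  have hg0 : (0:ℤ) < (Int.gcd c p : ℤ) := by exact_mod_cast Nat.pos_of_ne_zero hgne
  set g : ℤ := (Int.gcd c p : ℤ) with hg
  obtain ⟨c', hc'⟩ : g ∣ c := Int.gcd_dvd_left c p
  obtain ⟨d, hd'⟩ : g ∣ p := Int.gcd_dvd_right c p
  have hdiv_c : c / g = c' := by rw [hc', Int.mul_ediv_cancel_left _ (by omega)]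
  have hdiv_p : p / g = d := by rw [hd', Int.mul_ediv_cancel_left _ (by omega)]
  have hcop : IsCoprime c' d := by
    rw [Int.isCoprime_iff_gcd_eq_one, ← hdiv_c, ← hdiv_p]
    exact Int.gcd_div_gcd_div_gcd (Nat.pos_of_ne_zero hgne)
  rw [hdiv_p]
  constructor
  · intro h
    have h3 : d ∣ c' * i := (mul_dvd_mul_iff_left (by omega : g ≠ 0)).mp
      (by rw [show g * (c' * i) = c * i by rw [hc']; ring, ← hd']; exact h)
    exact hcop.symm.dvd_of_dvd_mul_left h3
  · rintro ⟨t, rfl⟩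
    exact ⟨c' * t, by rw [hc', hd'] ; ring⟩

-- count of i in 1..n with p ∣ c*i, closed form
lemma countMult (c p : ℤ) (hp : 0 < p) (k : ℕ) :
    ∑ i ∈ Finset.range k, (if p ∣ c * ((i:ℤ) + 1) then (1:ℤ) else 0)
      = (k : ℤ) / (p / (Int.gcd c p : ℤ)) := by
  have hgne : Int.gcd c p ≠ 0 := by
    simp [Int.gcd_eq_zero_iff]
    omega
  have hg0 : (0:ℤ) < (Int.gcd c p : ℤ) := by exact_mod_cast Nat.pos_of_ne_zero hgne
  set g : ℤ := (Int.gcd c p : ℤ) with hg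
  obtain ⟨d, hd'⟩ : g ∣ p := Int.gcd_dvd_right c p
  have hd0 : 0 < d := by
    by_contra hcon
    have hle : d ≤ 0 := by omega
    nlinarith
  have hdiv_p : p / g = d := by
    rw [hd', Int.mul_ediv_cancel_left _ (by omega)]
  rw [hdiv_p, ← countDvd d hd0 k]
  refine Finset.sum_congr rfl fun i _ => ?_
  congr 1
  rw [show (p ∣ c * ((i:ℤ) + 1)) = (p / g ∣ ((i:ℤ) + 1)) from
    propext (dvdIff c p _ hp), hdiv_p]

-- the Gauss-lemma indicator as floors minus the boundary-residue indicator (any p > 0)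
lemma termId (p x : ℤ) (hp : 0 < p) :
    (if 2 * PySem.Int.mod x p > p then (1:ℤ) else 0)
      = (2 * x) / p - 2 * (x / p)
        - ((if p ∣ 2 * x then (1:ℤ) else 0) - (if p ∣ x then (1:ℤ) else 0)) := by
  rw [PySem.Int.mod_eq_emod_of_pos hp]
  have hr0 : 0 ≤ x % p := Int.emod_nonneg _ (by omega)
  have hrp : x % p < p := Int.emod_lt_of_pos _ hp
  have hx : x = p * (x / p) + x % p := by linarith [Int.ediv_add_emod x p]
  have h2x : (2 * x) / p = (2 * (x % p)) / p + 2 * (x / p) := by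
    rw [show 2 * x = 2 * (x % p) + 2 * (x / p) * p by linarith,
      Int.add_mul_ediv_right _ _ (by omega : p ≠ 0)]
  have hdx : (p ∣ x) ↔ x % p = 0 := Int.dvd_iff_emod_eq_zero
  have hd2x : (p ∣ 2 * x) ↔ (2 * (x % p)) % p = 0 := by
    rw [Int.dvd_iff_emod_eq_zero, show 2 * x = 2 * (x % p) + (2 * (x / p)) * p by linarith,
      Int.add_mul_emod_self_right _ _ _]
  by_cases h1 : 2 * (x % p) < p
  · have hq : (2 * (x % p)) / p = 0 := Int.ediv_eq_zero_of_lt (by omega) h1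
    have hm2 : (2 * (x % p)) % p = 2 * (x % p) := Int.emod_eq_of_lt (by omega) h1
    by_cases hz : x % p = 0
    · rw [if_neg (by omega), if_pos (hd2x.mpr (by rw [hm2, hz]; ring)), if_pos (hdx.mpr hz)]
      omega
    · rw [if_neg (by omega), if_neg (by rw [hd2x, hm2]; omega), if_neg (by rw [hdx]; exact hz)]
      omega
  · have hq : (2 * (x % p)) / p = 1 := by
      rw [show 2 * (x % p) = (2 * (x % p) - p) + 1 * p by ring,
        Int.add_mul_ediv_right _ _ (by omega : p ≠ 0),
        Int.ediv_eq_zero_of_lt (by omega) (by omega)]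
      norm_num
    have hm2 : (2 * (x % p)) % p = 2 * (x % p) - p := by
      calc (2 * (x % p)) % p = (2 * (x % p) - p + 1 * p) % p := by congr 1; ring
        _ = (2 * (x % p) - p) % p := Int.add_mul_emod_self_right _ _ _
        _ = 2 * (x % p) - p := Int.emod_eq_of_lt (by omega) (by omega)
    by_cases hb : 2 * (x % p) = p
    · rw [if_neg (by omega), if_pos (hd2x.mpr (by omega)), if_neg (by rw [hdx]; omega)]
      omega
    · rw [if_pos (by omega), if_neg (by rw [hd2x]; omega), if_neg (by rw [hdx]; omega)]
      omega

-- ===== VERDICT (by name: the statement is the Claim_ definition above) =====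
theorem get_s_spec : Claim_equal_get_s := by
  unfold Claim_equal_get_s
  intro a p _
  unfold Spec_get_s get_s get_s_alt
  simp only []
  by_cases hn : PySem.Int.floordiv (p - 1) 2 ≤ 0
  · rw [if_pos hn, PySem.List.pyRange_one_eq_nil (by omega)]
    rfl
  · rw [if_neg hn]
    set n : ℤ := PySem.Int.floordiv (p - 1) 2 with hndef
    have hne : n = (p - 1) / 2 := PySem.Int.floordiv_eq_ediv_of_pos (by norm_num)
    have hn1 : 1 ≤ n := by omega
    have hp3 : 3 ≤ p := by omega
    have hg20 : (0:ℤ) < (Int.gcd (2 * a) p : ℤ) := by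
      exact_mod_cast Nat.pos_of_ne_zero (by simp [Int.gcd_eq_zero_iff]; omega)
    have hg10 : (0:ℤ) < (Int.gcd a p : ℤ) := by
      exact_mod_cast Nat.pos_of_ne_zero (by simp [Int.gcd_eq_zero_iff]; omega)
    have hd20 : 0 < p / (Int.gcd (2 * a) p : ℤ) := by
      have h1 : (Int.gcd (2 * a) p : ℤ) ≤ p := Int.le_of_dvd (by omega) (Int.gcd_dvd_right (2 * a) p)
      have := (Int.le_ediv_iff_mul_le hg20).mpr (by linarith : 1 * (Int.gcd (2 * a) p : ℤ) ≤ p)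
      omega
    have hd10 : 0 < p / (Int.gcd a p : ℤ) := by
      have h1 : (Int.gcd a p : ℤ) ≤ p := Int.le_of_dvd (by omega) (Int.gcd_dvd_right a p)
      have := (Int.le_ediv_iff_mul_le hg10).mpr (by linarith : 1 * (Int.gcd a p : ℤ) ≤ p)
      omega
    have hkn : ((n.toNat : ℤ)) = n := Int.toNat_of_nonneg (by omega)
    have hc2 : ∑ i ∈ Finset.range n.toNat, (if p ∣ 2 * a * ((i:ℤ) + 1) then (1:ℤ) else 0)
        = n / (p / (Int.gcd (2 * a) p : ℤ)) := by
      rw [countMult (2 * a) p (by omega) n.toNat, hkn]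
    have hc1 : ∑ i ∈ Finset.range n.toNat, (if p ∣ a * ((i:ℤ) + 1) then (1:ℤ) else 0)
        = n / (p / (Int.gcd a p : ℤ)) := by
      rw [countMult a p (by omega) n.toNat, hkn]
    rw [show n + 1 = ((n.toNat : ℤ)) + 1 by omega, get_s_fold a p n.toNat,
      floorSum_eq n p (2 * a) (2 * a) (by omega) (by omega),
      floorSum_eq n p a a (by omega) (by omega),
      PySem.Int.floordiv_eq_ediv_of_pos hg20, PySem.Int.floordiv_eq_ediv_of_pos hg10,
      PySem.Int.floordiv_eq_ediv_of_pos hd20, PySem.Int.floordiv_eq_ediv_of_pos hd10,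
      ← hc2, ← hc1]
    unfold fsSpec
    rw [Finset.mul_sum, ← Finset.sum_sub_distrib, ← Finset.sum_sub_distrib,
      ← Finset.sum_sub_distrib]
    refine Finset.sum_congr rfl fun i _ => ?_
    rw [show ((i:ℤ) + 1) * a = a * ((i:ℤ) + 1) by ring,
      show 2 * a * (i:ℤ) + 2 * a = 2 * (a * ((i:ℤ) + 1)) by ring,
      show a * (i:ℤ) + a = a * ((i:ℤ) + 1) by ring,
      show 2 * a * ((i:ℤ) + 1) = 2 * (a * ((i:ℤ) + 1)) by ring]
    exact termId p (a * ((i:ℤ) + 1)) (by omega)
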